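-- pv_equiv track=rewrite | github.com/CALEBCH0/cl-research | face_cl_comparison/src/datasets/lfw_configs.py | estimate_dataset_size
-- ===== SOURCE A (Python) =====
-- def estimate_dataset_size(min_faces_per_person):
--     """Estimate number of identities and total images for given threshold."""
--     # Based on LFW statistics
--     estimates = {
--         70: (7, 490),      # ~7 people with 70+ images
--         50: (20, 1000),    # ~20 people with 50+ images
--         30: (50, 1500),    # ~50 people with 30+ images
--         20: (80, 1600),    # ~80 people with 20+ images
--         15: (100, 1500),   # ~100 people with 15+ images
--         10: (150, 1500),   # ~150 people with 10+ images
--         5: (400, 2000),    # ~400 people with 5+ images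
--     }
--
--     # Find closest estimate
--     thresholds = sorted(estimates.keys(), reverse=True)
--     for threshold in thresholds:
--         if min_faces_per_person >= threshold:
--             return estimates[threshold]
--
--     # Default to lowest threshold
--     return estimates[5]
-- ===== SOURCE B (Python) =====
-- KEYS = [5, 10, 15, 20, 30, 50, 70]
-- OUTS = [(400, 2000), (150, 1500), (100, 1500), (80, 1600),
--         (50, 1500), (20, 1000), (7, 490)]
--
--
-- def estimate_dataset_size(min_faces_per_person):
--     """Estimate number of identities and total images for given threshold."""
--     # Binary search for the number of thresholds <= the input.
--     lo, hi = 0, len(KEYS)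
--     while lo < hi:
--         mid = (lo + hi) // 2
--         if KEYS[mid] <= min_faces_per_person:
--             lo = mid + 1
--         else:
--             hi = mid
--     # lo = count of thresholds not exceeding the input; clamp to the
--     # smallest bracket when the input is below every threshold.
--     return OUTS[lo - 1] if lo > 0 else OUTS[0]
-- ===== Notes on version B (the rewrite author's own statement) =====
-- stated objective: alternative
-- what changed: Replaced A's per-call dict construction plus descending linear scan with a module-level sorted key table probed by a hand-written binary search (count of thresholds <= input, clamped at 0).
import Mathlib
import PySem

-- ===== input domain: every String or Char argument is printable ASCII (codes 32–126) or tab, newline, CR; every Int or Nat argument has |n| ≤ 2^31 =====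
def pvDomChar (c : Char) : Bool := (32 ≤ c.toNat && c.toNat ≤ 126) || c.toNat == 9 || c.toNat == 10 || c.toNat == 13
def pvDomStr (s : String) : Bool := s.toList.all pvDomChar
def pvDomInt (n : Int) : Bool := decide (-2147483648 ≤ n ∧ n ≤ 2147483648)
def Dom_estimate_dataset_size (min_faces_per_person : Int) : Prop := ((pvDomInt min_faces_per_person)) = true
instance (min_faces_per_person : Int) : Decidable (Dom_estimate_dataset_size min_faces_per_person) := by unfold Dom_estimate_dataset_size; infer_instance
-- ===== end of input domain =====

-- B replaces A's per-call dict + descending linear scan with a constant sorted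
-- table probed by a hand-written binary search (alternative decomposition).


-- ===== PORT A =====
-- the for-loop over the descending thresholds: first threshold ≤ the input wins
def pvScanA (ts : List Int) (m : Int) (d : PySem.Dict Int (Int × Int)) : Int × Int :=
  match ts with
  | [] => (d.get? 5).getD (0, 0)          -- fallthrough: return estimates[5]
  | t :: rest => if m ≥ t then (d.get? t).getD (0, 0) else pvScanA rest m d

def estimate_dataset_size (min_faces_per_person : Int) : Int × Int :=
  let estimates : PySem.Dict Int (Int × Int) :=
    PySem.Dict.ofList [(70, (7, 490)), (50, (20, 1000)), (30, (50, 1500)),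
                       (20, (80, 1600)), (15, (100, 1500)), (10, (150, 1500)),
                       (5, (400, 2000))]
  let thresholds := PySem.List.sorted estimates.keys (fun x => x) true
  pvScanA thresholds min_faces_per_person estimates

-- ===== PORT B =====
def pvKEYS : List Int := [5, 10, 15, 20, 30, 50, 70]
def pvOUTS : List (Int × Int) :=
  [(400, 2000), (150, 1500), (100, 1500), (80, 1600), (50, 1500), (20, 1000), (7, 490)]

-- the while-loop of Source B: binary search for the count of keys ≤ m
def pvBsearch (m : Int) (lo hi : Nat) : Nat :=
  if h : lo < hi then
    let mid := (lo + hi) / 2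
    if pvKEYS.getD mid 0 ≤ m then pvBsearch m (mid + 1) hi else pvBsearch m lo mid
  else lo
termination_by hi - lo
decreasing_by all_goals omega

def estimate_dataset_size_alt (min_faces_per_person : Int) : Int × Int :=
  let lo := pvBsearch min_faces_per_person 0 pvKEYS.length
  if lo > 0 then pvOUTS.getD (lo - 1) (0, 0) else pvOUTS.getD 0 (0, 0)

-- ===== PRECONDITION & SPEC =====
def Spec_estimate_dataset_size (min_faces_per_person : Int) (out : Int × Int) : Prop := out = estimate_dataset_size_alt min_faces_per_person
instance (min_faces_per_person : Int) (out : Int × Int) : Decidable (Spec_estimate_dataset_size min_faces_per_person out) := by unfold Spec_estimate_dataset_size; infer_instance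

-- ===== CLAIM (what is proved, stated in full; the proofs are below) =====
def Claim_equal_estimate_dataset_size : Prop := ∀ (min_faces_per_person : Int), Dom_estimate_dataset_size min_faces_per_person → Spec_estimate_dataset_size min_faces_per_person (estimate_dataset_size min_faces_per_person)

-- ===== LEMMAS AND PROOFS =====

-- evaluate B's binary-search loop symbolically, one recursion node at a time
theorem pvB67 (m : Int) : pvBsearch m 6 7 = if (70:Int) ≤ m then 7 else 6 := by
  rw [pvBsearch]; norm_num [pvKEYS]
  split_ifs with h <;> (rw [pvBsearch]; norm_num)

theorem pvB45 (m : Int) : pvBsearch m 4 5 = if (30:Int) ≤ m then 5 else 4 := by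
  rw [pvBsearch]; norm_num [pvKEYS]
  split_ifs with h <;> (rw [pvBsearch]; norm_num)

theorem pvB23 (m : Int) : pvBsearch m 2 3 = if (15:Int) ≤ m then 3 else 2 := by
  rw [pvBsearch]; norm_num [pvKEYS]
  split_ifs with h <;> (rw [pvBsearch]; norm_num)

theorem pvB01 (m : Int) : pvBsearch m 0 1 = if (5:Int) ≤ m then 1 else 0 := by
  rw [pvBsearch]; norm_num [pvKEYS]
  split_ifs with h <;> (rw [pvBsearch]; norm_num)

theorem pvB47 (m : Int) : pvBsearch m 4 7 =
    if (70:Int) ≤ m then 7 else if (50:Int) ≤ m then 6 else if (30:Int) ≤ m then 5 else 4 := by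
  rw [pvBsearch]; norm_num [pvKEYS]
  split_ifs with h <;> simp only [pvB67, pvB45] <;> split_ifs <;> omega

theorem pvB03 (m : Int) : pvBsearch m 0 3 =
    if (15:Int) ≤ m then 3 else if (10:Int) ≤ m then 2 else if (5:Int) ≤ m then 1 else 0 := by
  rw [pvBsearch]; norm_num [pvKEYS]
  split_ifs with h <;> simp only [pvB23, pvB01] <;> split_ifs <;> omega

theorem pvBsearch_eval (m : Int) : pvBsearch m 0 7 =
    if (70:Int) ≤ m then 7 else if (50:Int) ≤ m then 6 else if (30:Int) ≤ m then 5
    else if (20:Int) ≤ m then 4 else if (15:Int) ≤ m then 3 else if (10:Int) ≤ m then 2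
    else if (5:Int) ≤ m then 1 else 0 := by
  rw [pvBsearch]; norm_num [pvKEYS]
  split_ifs with h <;> simp only [pvB47, pvB03] <;> split_ifs <;> omega

-- ===== VERDICT (by name: the statement is the Claim_ definition above) =====
theorem estimate_dataset_size_spec : Claim_equal_estimate_dataset_size := by
  intro m _
  unfold Spec_estimate_dataset_size estimate_dataset_size estimate_dataset_size_alt
  have hkeys : PySem.List.sorted (PySem.Dict.ofList
      [((70:Int), ((7:Int), (490:Int))), (50, (20, 1000)), (30, (50, 1500)),
       (20, (80, 1600)), (15, (100, 1500)), (10, (150, 1500)),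
       (5, (400, 2000))]).keys (fun x => x) true = [70, 50, 30, 20, 15, 10, 5] := by decide
  simp only [hkeys, pvScanA]
  have hlen : pvKEYS.length = 7 := by decide
  rw [hlen, pvBsearch_eval m]
  split_ifs <;> first | omega | decide
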